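-- pv_equiv track=rewrite | github.com/YusunPark/algorithm | codetree/beautiful-number.py | check
-- ===== SOURCE A (Python) =====
-- def check(number):
--     num = 0
--     count = 0
--     for i in number:
--         if count == 0:
--             num = i
--             count = i
--
--         if i == num: # 같은 숫자인 경우
--             count -= 1
--         else:
--             return False
--     if count != 0:
--         return False
--     return True
-- ===== SOURCE B (Python) =====
-- def check(number):
--     number = list(number)
--     n = len(number)
--     i = 0
--     while i < n:
--         v = number[i]
--         if v <= 0:
--             return False
--         for _ in range(v):
--             if i >= n or number[i] != v:
--                 return False
--             i += 1
--     return True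
-- ===== Notes on version B (the rewrite author's own statement) =====
-- stated objective: alternative
-- what changed: Replaces A's single flat loop with a countdown accumulator by a block decomposition: read the block value v, fail immediately if v <= 0, then consume v consecutive entries equal to v via an explicit index.
import Mathlib
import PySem

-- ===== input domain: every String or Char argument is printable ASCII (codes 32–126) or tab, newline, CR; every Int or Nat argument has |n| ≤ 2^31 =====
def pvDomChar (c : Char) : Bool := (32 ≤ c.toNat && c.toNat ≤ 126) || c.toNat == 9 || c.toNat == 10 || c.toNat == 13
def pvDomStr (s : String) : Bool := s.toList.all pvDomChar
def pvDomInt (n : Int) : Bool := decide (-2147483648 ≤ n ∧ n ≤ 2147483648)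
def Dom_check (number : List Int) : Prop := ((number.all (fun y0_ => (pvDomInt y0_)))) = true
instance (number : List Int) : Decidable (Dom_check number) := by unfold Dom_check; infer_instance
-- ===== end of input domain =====

-- B re-implements the run-length check with an explicit block loop (read a value v>0, then
-- consume v equal entries) instead of A's countdown accumulator; objective: alternative, same O(n).

-- ===== PORT A =====
-- A's for-loop with state (num, count) and early returns, as structural recursion.
def checkLoop (num count : Int) : List Int → Bool
  | [] => count == 0
  | i :: rest =>
    let num' := if count == 0 then i else num
    let count' := if count == 0 then i else count
    if i == num' then checkLoop num' (count' - 1) rest else false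

def check (number : List Int) : Bool := checkLoop 0 0 number

-- ===== PORT B =====
-- B's inner `for _ in range(v)` loop: consume k entries, each required to exist and equal v.
def consume (v : Int) : Nat → List Int → Option (List Int)
  | 0, xs => some xs
  | _ + 1, [] => none
  | k + 1, x :: rest => if x == v then consume v k rest else none

-- used by altLoop's decreasing_by
theorem consume_len {v : Int} : ∀ {k : Nat} {xs ys : List Int},
    consume v k xs = some ys → xs.length = k + ys.length := by
  intro k
  induction k with
  | zero => intro xs ys h; simp [consume] at h; simp [h]
  | succ n ih =>
    intro xs ys h
    cases xs with
    | nil => simp [consume] at h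
    | cons x rest =>
      simp only [consume] at h
      split at h
      · have := ih h
        simp [List.length, this]; omega
      · exact absurd h (by simp)

-- B's outer while loop: at each remaining suffix, read v, fail if v ≤ 0, else consume a block of v.
def altLoop : List Int → Bool
  | [] => true
  | v :: rest =>
    if v ≤ 0 then false
    else
      match hcs : consume v v.toNat (v :: rest) with
      | none => false
      | some rest' => altLoop rest'
termination_by xs => xs.length
decreasing_by
  have hlen := consume_len hcs
  simp at hlen ⊢
  omega

def check_alt (number : List Int) : Bool := altLoop number

-- ===== PRECONDITION & SPEC =====
def Spec_check (number : List Int) (out : Bool) : Prop := out = check_alt number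
instance (number : List Int) (out : Bool) : Decidable (Spec_check number out) := by unfold Spec_check; infer_instance

-- ===== CLAIM (what is proved, stated in full; the proofs are below) =====
def Claim_equal_check : Prop := ∀ (number : List Int), Dom_check number → Spec_check number (check number)

-- ===== LEMMAS AND PROOFS =====

-- A negative countdown can never return to 0, so A ends in False.
theorem checkLoop_neg : ∀ (xs : List Int) (num count : Int), count < 0 →
    checkLoop num count xs = false := by
  intro xs
  induction xs with
  | nil => intro num count h; simp [checkLoop]; omega
  | cons x rest ih =>
    intro num count h
    have hc : (count == 0) = false := by simp; omega
    simp only [checkLoop, hc, if_false, Bool.false_eq_true]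
    split
    · exact ih _ _ (by omega)
    · rfl

-- With a nonnegative countdown k, A's loop consumes k copies of num and continues from count = 0.
theorem checkLoop_consume : ∀ (k : Nat) (num : Int) (xs : List Int),
    checkLoop num (k : Int) xs =
      match consume num k xs with
      | none => false
      | some ys => checkLoop num 0 ys := by
  intro k
  induction k with
  | zero => intro num xs; simp [consume]
  | succ n ih =>
    intro num xs
    cases xs with
    | nil =>
      have : ((n : Int) + 1 == 0) = false := by simp; omega
      simp [checkLoop, consume, this]
    | cons x rest =>
      have hc : (((n : Nat) + 1 : Int) == 0) = false := by simp; omega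
      simp only [checkLoop, consume, Nat.cast_add, Nat.cast_one, hc]
      by_cases hx : x = num
      · have : ((n : Int) + 1 - 1) = (n : Int) := by ring
        simp [hx, this, ih]
      · simp [hx, beq_iff_eq]

theorem checkLoop_zero_eq_altLoop : ∀ (n : Nat) (xs : List Int) (num : Int),
    xs.length ≤ n → checkLoop num 0 xs = altLoop xs := by
  intro n
  induction n with
  | zero =>
    intro xs num h
    have : xs = [] := by cases xs <;> simp_all
    simp [this, checkLoop, altLoop]
  | succ n ih =>
    intro xs num h
    cases xs with
    | nil => simp [checkLoop, altLoop]
    | cons v rest =>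
      simp only [checkLoop, beq_self_eq_true, if_true]
      by_cases hv : v ≤ 0
      · rw [checkLoop_neg rest v (v - 1) (by omega)]
        rw [altLoop]
        simp [hv]
      · -- v ≥ 1
        have hvt : ((v.toNat - 1 : Nat) : Int) = v - 1 := by omega
        rw [← hvt, checkLoop_consume]
        rw [altLoop]
        simp only [if_neg hv]
        have hsplit : consume v v.toNat (v :: rest) = consume v (v.toNat - 1) rest := by
          have : v.toNat = (v.toNat - 1) + 1 := by omega
          rw [this]
          simp [consume]
        rw [hsplit]
        cases hcon : consume v (v.toNat - 1) rest with
        | none => simp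
        | some ys =>
          simp only
          have hlen := consume_len hcon
          have : ys.length ≤ n := by simp at h; omega
          exact ih ys v this

-- ===== VERDICT (by name: the statement is the Claim_ definition above) =====
theorem check_spec : Claim_equal_check := by
  intro number _
  unfold Spec_check check check_alt
  exact checkLoop_zero_eq_altLoop number.length number 0 le_rfl
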